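-- pv_equiv track=rewrite | github.com/needitem/pixllm | backend/app/services/tools/query_terms.py | _query_ngram_compacts
-- ===== SOURCE A (Python) =====
-- from typing import Dict, Iterable, List, Sequence, Tuple
--
-- def _unique_preserving_order(values: Iterable[str]) -> List[str]:
--     out: List[str] = []
--     seen = set()
--     for value in values:
--         token = str(value or "").strip()
--         if not token or token in seen:
--             continue
--         seen.add(token)
--         out.append(token)
--     return out
--
-- def _query_ngram_compacts(words: Sequence[str], max_n: int, min_compact_length: int) -> List[str]:
--     compacts: List[str] = []
--     bounded_max_n = max(2, int(max_n or 2))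
--     for n in range(2, bounded_max_n + 1):
--         for idx in range(0, max(0, len(words) - n + 1)):
--             window = words[idx : idx + n]
--             compact = "".join(window)
--             if len(compact) >= max(2, int(min_compact_length or 2)):
--                 compacts.append(compact)
--     return _unique_preserving_order(compacts)
-- ===== SOURCE B (Python) =====
-- from typing import Iterable, List, Sequence
--
-- def _unique_preserving_order(values: Iterable[str]) -> List[str]:
--     out: List[str] = []
--     seen = set()
--     for value in values:
--         token = str(value or "").strip()
--         if not token or token in seen:
--             continue
--         seen.add(token)
--         out.append(token)
--     return out
--
-- def _query_ngram_compacts(words: Sequence[str], max_n: int, min_compact_length: int) -> List[str]: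
--     bounded_max_n = max(2, int(max_n or 2))
--     threshold = max(2, int(min_compact_length or 2))
--     # layer for n = 2, then extend each window string by one word per layer (DP over n)
--     current = [words[i] + words[i + 1] for i in range(len(words) - 1)]
--     emitted = [c for c in current if len(c) >= threshold]
--     for n in range(3, bounded_max_n + 1):
--         current = [current[i] + words[i + n - 1] for i in range(len(words) - n + 1)]
--         emitted.extend(c for c in current if len(c) >= threshold)
--     return _unique_preserving_order(emitted)
-- ===== Notes on version B (the rewrite author's own statement) =====
-- stated objective: alternative
-- what changed: A re-joins every n-word window from scratch with ''.join(words[idx:idx+n]); B keeps one table of the previous layer's window strings and derives each width-(n+1) window by appending a single word to the previous width-n window (DP recurrence over n), emitting in the identical n-major, idx-minor order before the same order-preserving dedup.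
import Mathlib
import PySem

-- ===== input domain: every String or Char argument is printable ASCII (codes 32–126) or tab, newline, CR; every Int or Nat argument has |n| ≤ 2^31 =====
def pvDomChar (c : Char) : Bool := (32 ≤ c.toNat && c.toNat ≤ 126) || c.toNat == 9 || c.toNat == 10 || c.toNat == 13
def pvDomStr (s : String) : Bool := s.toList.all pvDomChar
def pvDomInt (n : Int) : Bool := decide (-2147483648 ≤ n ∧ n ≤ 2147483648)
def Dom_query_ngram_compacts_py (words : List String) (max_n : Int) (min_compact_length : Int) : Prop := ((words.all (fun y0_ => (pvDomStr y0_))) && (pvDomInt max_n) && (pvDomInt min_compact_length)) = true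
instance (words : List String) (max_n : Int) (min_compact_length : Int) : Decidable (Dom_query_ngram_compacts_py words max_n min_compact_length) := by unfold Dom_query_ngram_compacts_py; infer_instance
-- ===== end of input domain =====

-- B replaces A's per-window ''.join(words[idx:idx+n]) recomputation by a DP table that extends
-- each previous layer's window string with one word (same emission order, same dedup); objective: alternative decomposition.


-- shared helper: port of _unique_preserving_order (used verbatim by both Pythons)
def uniquePreservingOrder (values : List String) : List String :=
  (values.foldl
    (fun (acc : List String × PySem.Set String) value =>
      -- token = str(value or "").strip(): for a str argument this is value.strip()
      let token := PySem.Str.strip value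
      if token = "" ∨ PySem.Set.contains acc.2 token then acc
      else (acc.1 ++ [token], PySem.Set.add acc.2 token))
    ([], PySem.Set.empty)).1

-- ===== PORT A =====
-- inner loop of A for one n (threshold recomputed from min_compact_length, as in A)
def aInner (words : List String) (min_compact_length : Int) (compacts : List String) (n : Int) : List String :=
  (PySem.List.pyRange 0 (max 0 ((words.length : Int) - n + 1)) 1).foldl
    (fun compacts idx =>
      let window := PySem.List.slice words (some idx) (some (idx + n))
      let compact := PySem.Str.join "" window
      if max 2 (if min_compact_length = 0 then 2 else min_compact_length) ≤ PySem.Str.len compact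
      then compacts ++ [compact] else compacts)
    compacts

def query_ngram_compacts_py (words : List String) (max_n : Int) (min_compact_length : Int) : List String :=
  let bounded_max_n : Int := max 2 (if max_n = 0 then 2 else max_n)
  let compacts : List String :=
    (PySem.List.pyRange 2 (bounded_max_n + 1) 1).foldl (aInner words min_compact_length) []
  uniquePreservingOrder compacts

-- ===== PORT B =====
-- one DP step of B: extend every window string of the previous layer with one more word
def bStep (words : List String) (threshold : Int) (st : List String × List String) (n : Int) :
    List String × List String :=
  let current := (List.range (words.length + 1 - n.toNat)).map
    (fun i => st.2.getD i "" ++ words.getD (i + n.toNat - 1) "")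
  (st.1 ++ current.filter (fun c => threshold ≤ PySem.Str.len c), current)

def query_ngram_compacts_py_alt (words : List String) (max_n : Int) (min_compact_length : Int) : List String :=
  let bounded_max_n : Int := max 2 (if max_n = 0 then 2 else max_n)
  let threshold : Int := max 2 (if min_compact_length = 0 then 2 else min_compact_length)
  let current0 : List String :=
    (List.range (words.length - 1)).map (fun i => words.getD i "" ++ words.getD (i + 1) "")
  let st :=
    (PySem.List.pyRange 3 (bounded_max_n + 1) 1).foldl (bStep words threshold)
      (current0.filter (fun c => threshold ≤ PySem.Str.len c), current0)
  uniquePreservingOrder st.1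

-- ===== PRECONDITION & SPEC =====
def Spec_query_ngram_compacts_py (words : List String) (max_n : Int) (min_compact_length : Int) (out : List String) : Prop := out = query_ngram_compacts_py_alt words max_n min_compact_length
instance (words : List String) (max_n : Int) (min_compact_length : Int) (out : List String) : Decidable (Spec_query_ngram_compacts_py words max_n min_compact_length out) := by unfold Spec_query_ngram_compacts_py; infer_instance

-- ===== CLAIM (what is proved, stated in full; the proofs are below) =====
def Claim_equal_query_ngram_compacts_py : Prop := ∀ (words : List String) (max_n : Int) (min_compact_length : Int), Dom_query_ngram_compacts_py words max_n min_compact_length → Spec_query_ngram_compacts_py words max_n min_compact_length (query_ngram_compacts_py words max_n min_compact_length)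

-- ===== LEMMAS AND PROOFS =====

-- the window string words[i] ++ … ++ words[i+n-1]
def pvW (words : List String) (n i : Nat) : String :=
  PySem.Str.join "" ((words.drop i).take n)

-- the full layer of windows of width n
def pvLayer (words : List String) (n : Nat) : List String :=
  (List.range (words.length + 1 - n)).map (pvW words n)

-- the emitted (length-filtered) windows of width n
def pvE (words : List String) (thr : Int) (n : Nat) : List String :=
  (pvLayer words n).filter (fun c => thr ≤ PySem.Str.len c)

-- all emissions for n = 2 .. t+2, in n-major order
def pvAcc (words : List String) (thr : Int) : Nat → List String
  | 0 => pvE words thr 2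
  | t + 1 => pvAcc words thr t ++ pvE words thr (t + 3)

theorem pv_intercalate_nil (l : List (List Char)) : List.intercalate [] l = l.flatten := by
  induction l with
  | nil => rfl
  | cons x xs ih =>
    cases xs with
    | nil => simp [List.intercalate]
    | cons y ys =>
      simp only [List.intercalate, List.intersperse] at ih ⊢
      simp_all [List.flatten]

theorem pvW_toList (words : List String) (n i : Nat) :
    (pvW words n i).toList = (((words.drop i).take n).map String.toList).flatten := by
  simp [pvW, PySem.Str.toList_join, PySem.Chars.join, pv_intercalate_nil]

theorem pvW_succ (words : List String) (n i : Nat) (h : i + n < words.length) :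
    pvW words (n + 1) i = pvW words n i ++ words.getD (i + n) "" := by
  apply String.toList_inj.mp
  rw [String.toList_append, pvW_toList, pvW_toList, List.take_add_one]
  have : (words.drop i)[n]? = some (words.getD (i + n) "") := by
    rw [List.getElem?_drop, List.getD_eq_getElem?_getD, List.getElem?_eq_getElem h]
    rfl
  simp [this]

theorem pvW_zero (words : List String) (i : Nat) : pvW words 0 i = "" := by
  apply String.toList_inj.mp
  simp [pvW_toList]

theorem pvW_two (words : List String) (i : Nat) (h : i + 1 < words.length) :
    pvW words 2 i = words.getD i "" ++ words.getD (i + 1) "" := by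
  have h0 : i + 0 < words.length := by omega
  have e1 : pvW words 1 i = words.getD i "" := by
    have := pvW_succ words 0 i h0
    simpa [pvW_zero] using this
  have := pvW_succ words 1 i h
  rw [this, e1]

-- B's initial layer is the n = 2 layer
theorem pv_current0 (words : List String) :
    (List.range (words.length - 1)).map (fun i => words.getD i "" ++ words.getD (i + 1) "") =
      pvLayer words 2 := by
  have hlen : words.length - 1 = words.length + 1 - 2 := by omega
  rw [pvLayer, ← hlen]
  apply List.map_congr_left
  intro i hi
  rw [List.mem_range] at hi
  exact (pvW_two words i (by omega)).symm

-- B's step turns layer n into layer n+1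
theorem pv_layer_step (words : List String) (n : Nat) :
    (List.range (words.length + 1 - (n + 1))).map
        (fun i => (pvLayer words n).getD i "" ++ words.getD (i + (n + 1) - 1) "") =
      pvLayer words (n + 1) := by
  rw [pvLayer]
  apply List.map_congr_left
  intro i hi
  rw [List.mem_range] at hi
  have h1 : i < words.length + 1 - n := by omega
  have h2 : (List.map (pvW words n) (List.range (words.length + 1 - n))).getD i "" = pvW words n i := by
    rw [List.getD_eq_getElem?_getD, List.getElem?_map, List.getElem?_range h1]
    rfl
  have h3 : i + (n + 1) - 1 = i + n := by omega
  rw [h2, h3, pvW_succ words n i (by omega)]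

-- A's inner loop for one n emits exactly pvE
theorem pv_aInner (words : List String) (mcl : Int) (acc : List String) (n : Int) (hn : 2 ≤ n) :
    aInner words mcl acc n =
      acc ++ pvE words (max 2 (if mcl = 0 then 2 else mcl)) n.toNat := by
  rw [aInner]
  have hfold := PySem.List.foldl_append_if
    (p := fun idx : Int => decide (max 2 (if mcl = 0 then 2 else mcl) ≤
      PySem.Str.len (PySem.Str.join "" (PySem.List.slice words (some idx) (some (idx + n))))))
    (f := fun idx : Int => PySem.Str.join "" (PySem.List.slice words (some idx) (some (idx + n))))
    (l := PySem.List.pyRange 0 (max 0 ((words.length : Int) - n + 1)) 1) (acc := acc)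
  simp only [decide_eq_true_eq] at hfold
  rw [hfold, List.append_cancel_left_eq, pvE, pvLayer, List.filter_map]
  have hK : ((max 0 ((words.length : Int) - n + 1)) - 0).toNat = words.length + 1 - n.toNat := by omega
  rw [PySem.List.pyRange_one, hK]
  have hfun : ∀ j : Nat, PySem.Str.join "" (PySem.List.slice words (some ((0:Int) + (j:Int))) (some ((0:Int) + (j:Int) + n))) = pvW words n.toNat j := by
    intro j
    rw [show ((0:Int) + (j:Int) + n) = ((j:Int) + (n.toNat : Int)) by omega,
        show ((0:Int) + (j:Int)) = ((j:Int)) by omega,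
        PySem.List.slice_natCast_add]
    rfl
  simp only [List.filter_map, List.map_map, Function.comp_def, hfun]

theorem pv_A_fold (words : List String) (mcl : Int) (t : Nat) :
    (PySem.List.pyRange 2 ((2 + (t : Int)) + 1) 1).foldl (aInner words mcl) [] =
      pvAcc words (max 2 (if mcl = 0 then 2 else mcl)) t := by
  induction t with
  | zero =>
    rw [show ((2 + ((0:Nat) : Int)) + 1) = (2:Int) + 1 by norm_num,
      PySem.List.pyRange_one_singleton]
    rw [List.foldl_cons, List.foldl_nil, pv_aInner words mcl [] 2 (by norm_num)]
    rfl
  | succ t ih =>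
    rw [show ((2 + ((t+1:Nat) : Int)) + 1) = ((2 + (t : Int)) + 1) + 1 by push_cast; ring,
      PySem.List.pyRange_one_succ_right (by omega), List.foldl_append, ih,
      List.foldl_cons, List.foldl_nil,
      pv_aInner words mcl _ _ (by omega)]
    have : ((2 + (t : Int)) + 1).toNat = t + 3 := by omega
    rw [this]
    rfl

theorem pv_B_fold (words : List String) (thr : Int) (t : Nat) :
    (PySem.List.pyRange 3 ((2 + (t : Int)) + 1) 1).foldl (bStep words thr)
        (pvE words thr 2, pvLayer words 2) = (pvAcc words thr t, pvLayer words (t + 2)) := by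
  induction t with
  | zero =>
    rw [show ((2 + ((0:Nat) : Int)) + 1) = (3:Int) by norm_num,
      PySem.List.pyRange_one_eq_nil (by norm_num), List.foldl_nil]
    rfl
  | succ t ih =>
    rw [show ((2 + ((t+1:Nat) : Int)) + 1) = ((2 + (t : Int)) + 1) + 1 by push_cast; ring,
      PySem.List.pyRange_one_succ_right (by omega), List.foldl_append, ih,
      List.foldl_cons, List.foldl_nil, bStep]
    have hn : ((2 + (t : Int)) + 1).toNat = (t + 2) + 1 := by omega
    simp only [hn, pv_layer_step words (t + 2)]
    rfl

-- ===== VERDICT (by name: the statement is the Claim_ definition above) =====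
theorem query_ngram_compacts_py_spec : Claim_equal_query_ngram_compacts_py := by
  intro words max_n min_compact_length _
  unfold Spec_query_ngram_compacts_py query_ngram_compacts_py query_ngram_compacts_py_alt
  have hm : 2 ≤ max 2 (if max_n = 0 then 2 else max_n) := le_max_left _ _
  obtain ⟨t, ht⟩ : ∃ t : Nat, max 2 (if max_n = 0 then 2 else max_n) = 2 + (t : Int) :=
    ⟨(max 2 (if max_n = 0 then 2 else max_n) - 2).toNat, by omega⟩
  simp only [ht]
  rw [pv_A_fold, pv_current0]
  have : (pvLayer words 2).filter
      (fun c => max 2 (if min_compact_length = 0 then 2 else min_compact_length) ≤ PySem.Str.len c) =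
      pvE words (max 2 (if min_compact_length = 0 then 2 else min_compact_length)) 2 := rfl
  rw [this, pv_B_fold]
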